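-- pv_equiv track=rewrite | github.com/Kimhyeonsuk/Programmers_Python | python_Algorithm/battle28/LySearch.py | solution
-- ===== SOURCE A (Python) =====
-- class Trie:
--     def __init__(self, val, depth=0):
--         self.child = {}
--         self.num = {}
--         self.val = val
--         self.depth = depth
--
--     def push(self, word):
--         node = self
--         while len(word) > 0:
--             node.num[len(word)] = node.num.get(len(word), 0) + 1
--             if word[0] not in node.child:
--                 node.child[word[0]] = Trie(word[0], node.depth + 1)
--             node = node.child[word[0]]
--             word = word[1:]
--
--
--     def search(self, word):
--         node = self
--         while len(word) > 0:
--             if word[0] == '?':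
--                 return node.num.get(len(word), 0)
--             if word[0] not in node.child:
--                 return 0
--             node = node.child[word[0]]
--             word = word[1:]
--
--     def __repr__(self):
--         return 'num: {}; val: {};'.format(str(self.num), self.val)
--
-- def solution(words, queries):
--     answer = []
--     t1 = Trie('')
--     t2 = Trie('')
--     for word in words:
--         t1.push(word)
--         t2.push(word[::-1])
--
--     for query in queries:
--         if query[0] != '?':
--             val = t1.search(query)
--         else:
--             val = t2.search(query[::-1])
--         answer.append(val)
--     return answer
-- ===== SOURCE B (Python) =====
-- def _search(q, ws):
--     # Progressively narrow the candidate words by each literal character of q;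
--     # a '?' ends the literal part: count the remaining candidates of q's length.
--     for i, ch in enumerate(q):
--         if ch == '?':
--             return sum(1 for w in ws if len(w) == len(q))
--         ws = [w for w in ws if len(w) > i and w[i] == ch]
--         if not ws:
--             return 0
--
--
-- def solution(words, queries):
--     rwords = [w[::-1] for w in words]
--     return [_search(q[::-1], rwords) if q[0] == '?' else _search(q, words)
--             for q in queries]
-- ===== Notes on version B (the rewrite author's own statement) =====
-- stated objective: simpler
-- what changed: Replaces A's two incrementally-built tries (per-node child dicts and per-depth length counters) by a direct per-query scan that progressively filters the candidate word list character by character (reversed words for front-wildcard queries) and counts candidates of the query's length at the first '?'; Pre_ only excludes empty queries, on which both programs' query[0] raises IndexError.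
import Mathlib
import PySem

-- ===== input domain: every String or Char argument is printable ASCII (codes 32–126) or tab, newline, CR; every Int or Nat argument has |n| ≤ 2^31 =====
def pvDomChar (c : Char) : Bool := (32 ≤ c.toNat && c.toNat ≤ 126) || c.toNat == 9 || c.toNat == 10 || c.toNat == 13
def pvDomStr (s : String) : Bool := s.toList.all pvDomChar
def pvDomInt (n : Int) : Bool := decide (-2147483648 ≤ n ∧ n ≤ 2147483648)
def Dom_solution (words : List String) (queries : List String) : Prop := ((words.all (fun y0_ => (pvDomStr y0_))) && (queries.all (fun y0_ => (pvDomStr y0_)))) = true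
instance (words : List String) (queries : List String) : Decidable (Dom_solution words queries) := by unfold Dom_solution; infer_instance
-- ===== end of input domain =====

-- B replaces A's two hand-built tries by a direct per-query count over the word list
-- (cut the query at its first '?', count words of the query's length sharing that
-- prefix; reversed words for front-wildcard queries): simpler, no trie structure.

-- ===== PORT A =====
mutual
inductive PTrie : Type where
  | mk : String → Int → PySem.Dict Int Int → PChildren → PTrie
inductive PChildren : Type where
  | nil : PChildren
  | cons : Char → PTrie → PChildren → PChildren
end

-- 'c in node.child' / 'node.child[c]' on the child dict (explicit child list, dict semantics)
def childGet? : PChildren → Char → Option PTrie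
  | .nil, _ => none
  | .cons a t rest, c => if a = c then some t else childGet? rest c

-- 'node.child[c] = v' (overwrite in place, append if new)
def childSet : PChildren → Char → PTrie → PChildren
  | .nil, c, u => .cons c u .nil
  | .cons a t rest, c, u => if a = c then .cons a u rest else .cons a t (childSet rest c u)

-- Trie.push: the Python while-loop walking/mutating down the path, as recursion on the word
def pushW : PTrie → List Char → PTrie
  | t, [] => t
  | .mk v d num ch, c :: rest =>
    let L : Int := ((c :: rest).length : Int)
    let num' := num.insert L (num.getD L 0 + 1)
    let sub := match childGet? ch c with
      | some u => u
      | none => PTrie.mk (String.ofList [c]) (d + 1) PySem.Dict.empty PChildren.nil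
    PTrie.mk v d num' (childSet ch c (pushW sub rest))

-- Trie.search: falls off the loop (None) when the word is exhausted
def searchW : PTrie → List Char → Option Int
  | _, [] => none
  | .mk _ _ num ch, c :: rest =>
    if c = '?' then some (num.getD (((c :: rest).length : Nat) : Int) 0)
    else match childGet? ch c with
      | none => some 0
      | some u => searchW u rest

def solution (words : List String) (queries : List String) : List (Option Int) :=
  let ts := words.foldl
    (fun (p : PTrie × PTrie) w => (pushW p.1 w.toList, pushW p.2 w.toList.reverse))
    (PTrie.mk "" 0 PySem.Dict.empty PChildren.nil, PTrie.mk "" 0 PySem.Dict.empty PChildren.nil)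
  queries.foldl (fun acc q =>
    acc ++ [match q.toList with
            | [] => none   -- query[0] raises IndexError in Python: excluded by Pre_solution
            | c :: _ => if c ≠ '?' then searchW ts.1 q.toList else searchW ts.2 q.toList.reverse]) []

-- ===== PORT B =====
-- _search(q, ws): the for-loop over enumerate(q); i is the enumerate index, L = len(q)
def goB (L : Nat) : Nat → List Char → List (List Char) → Option Int
  | _, [], _ => none
  | i, c :: rest, ws =>
    if c = '?' then some ((ws.countP (fun w => w.length == L) : Nat) : Int)
    else
      -- 'len(w) > i and w[i] == ch' (w[i] read under the len(w) > i guard: exact)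
      let ws' := ws.filter (fun w => decide (i < w.length) && (w[i]? == some c))
      if ws' = [] then some 0
      else goB L (i + 1) rest ws'

def searchB (q : List Char) (ws : List (List Char)) : Option Int :=
  goB q.length 0 q ws

def solution_alt (words : List String) (queries : List String) : List (Option Int) :=
  let rwords := words.map (fun w => w.toList.reverse)
  queries.map (fun q =>
    match q.toList with
    | [] => none   -- q[0] raises IndexError in Python: excluded by Pre_solution
    | c :: _ =>
      if c = '?' then searchB q.toList.reverse rwords
      else searchB q.toList (words.map String.toList))

-- ===== PRECONDITION & SPEC =====
-- Pre_ excludes an empty-string query, on which A's 'query[0]' raises IndexError.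
def Pre_solution (words : List String) (queries : List String) : Prop := ∀ q ∈ queries, q ≠ ""
instance (words : List String) (queries : List String) : Decidable (Pre_solution words queries) := by unfold Pre_solution; infer_instance
def pvWitness_solution : List String × List String := (["ab", "cd", "ab"], ["a?", "?b", "ab", "x?"])

def Spec_solution (words : List String) (queries : List String) (out : List (Option Int)) : Prop := out = solution_alt words queries
instance (words : List String) (queries : List String) (out : List (Option Int)) : Decidable (Spec_solution words queries out) := by unfold Spec_solution; infer_instance

-- ===== CLAIM (what is proved, stated in full; the proof is below) =====
def Claim_equal_solution : Prop := ∀ (words : List String) (queries : List String), Dom_solution words queries → Pre_solution words queries → Spec_solution words queries (solution words queries)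

-- ===== LEMMAS AND PROOFS =====

-- projections of a trie node (proof-side helpers)
def PTrie.num : PTrie → PySem.Dict Int Int
  | .mk _ _ n _ => n
def PTrie.depth : PTrie → Int
  | .mk _ d _ _ => d
def PTrie.child : PTrie → PChildren
  | .mk _ _ _ ch => ch


-- tails of the words beginning with c (the word list seen by the child node at c)
def tailsOf (c : Char) (ws : List (List Char)) : List (List Char) :=
  (ws.filter (fun w => w.head? == some c)).map List.tail

-- what A's search computes on the trie built from ws, phrased on the word list
def specCount : List Char → List (List Char) → Option Int
  | [], _ => none
  | c :: rest, ws =>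
    if c = '?' then some ((ws.countP (fun w => w.length == rest.length + 1) : Nat) : Int)
    else if ws.any (fun w => w.head? == some c) then specCount rest (tailsOf c ws)
    else some 0

-- the per-query entry of A's answer list, on the word lists the two tries are built from
def entryA (words : List String) (q : String) : Option Int :=
  match q.toList with
  | [] => none
  | c :: _ =>
    if c ≠ '?' then specCount q.toList (words.map String.toList)
    else specCount q.toList.reverse (words.map (fun w => w.toList.reverse))

theorem childGet?_childSet : ∀ (ch : PChildren) (a c : Char) (u : PTrie),
    childGet? (childSet ch a u) c = if a = c then some u else childGet? ch c
  | .nil, a, c, u => by by_cases h : a = c <;> simp [childSet, childGet?, h]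
  | .cons b t rest, a, c, u => by
    have ih := childGet?_childSet rest a c u
    by_cases hb : b = a
    · subst hb; by_cases h : b = c <;> simp [childSet, childGet?, h]
    · by_cases hc : b = c
      · subst hc
        have hac : ¬ a = b := fun h => hb h.symm
        simp [childSet, childGet?, hb, hac]
      · simp [childSet, childGet?, hb, hc, ih]

theorem depth_pushW (t : PTrie) (w : List Char) : (pushW t w).depth = t.depth := by
  cases t with
  | mk v d num ch =>
    cases w with
    | nil => rfl
    | cons c rest => simp [pushW, PTrie.depth]

theorem num_pushW (t : PTrie) (w : List Char) (n : Nat) (hn : 1 ≤ n) :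
    (pushW t w).num.getD (n : Int) 0 =
      t.num.getD (n : Int) 0 + (if w.length == n then 1 else 0) := by
  cases t with
  | mk v d num ch =>
    cases w with
    | nil =>
      have h : ¬ (0 = n) := by omega
      simp [pushW, PTrie.num, h]
    | cons c rest =>
      simp only [pushW, PTrie.num]
      rw [PySem.Dict.getD_insert]
      by_cases h : (n : Int) = (((c :: rest).length : Nat) : Int)
      · have hn' : (c :: rest).length = n := by exact_mod_cast h.symm
        rw [if_pos h, ← h, if_pos (by simp [hn'])]
      · have hn' : ¬ ((c :: rest).length == n) = true := by
          simp; intro e; exact h (by exact_mod_cast e.symm)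
        rw [if_neg h, if_neg hn']; ring

theorem num_foldl (ws : List (List Char)) (t : PTrie) (n : Nat) (hn : 1 ≤ n) :
    (ws.foldl pushW t).num.getD (n : Int) 0 =
      t.num.getD (n : Int) 0 + ((ws.countP (fun w => w.length == n) : Nat) : Int) := by
  induction ws generalizing t with
  | nil => simp
  | cons w ws ih =>
    simp only [List.foldl_cons, List.countP_cons]
    rw [ih (pushW t w), num_pushW t w n hn]
    by_cases h : (w.length == n) = true <;> simp [h] <;> push_cast <;> ring

theorem child_pushW (t : PTrie) (a : Char) (rest : List Char) (c : Char) :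
    childGet? (pushW t (a :: rest)).child c =
      if a = c then
        some (pushW (match childGet? t.child a with
                     | some u => u
                     | none => PTrie.mk (String.ofList [a]) (t.depth + 1) PySem.Dict.empty PChildren.nil) rest)
      else childGet? t.child c := by
  cases t with
  | mk v d num ch => simp [pushW, PTrie.child, PTrie.depth, childGet?_childSet]

theorem child_foldl (ws : List (List Char)) : ∀ (t : PTrie) (c : Char),
    childGet? (ws.foldl pushW t).child c =
      match childGet? t.child c with
      | some u => some ((tailsOf c ws).foldl pushW u)
      | none =>
        if ws.any (fun w => w.head? == some c)
        then some ((tailsOf c ws).foldl pushW (PTrie.mk (String.ofList [c]) (t.depth + 1) PySem.Dict.empty PChildren.nil))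
        else none := by
  induction ws with
  | nil =>
    intro t c
    simp only [List.foldl_nil, tailsOf, List.filter_nil, List.map_nil, List.any_nil]
    cases h : childGet? t.child c <;> simp
  | cons w ws ih =>
    intro t c
    simp only [List.foldl_cons]
    rw [ih]
    cases w with
    | nil =>
      have h1 : pushW t [] = t := rfl
      have htails : tailsOf c ([] :: ws) = tailsOf c ws := by
        simp [tailsOf]
      have hany : (([] : List Char) :: ws).any (fun w => w.head? == some c) =
          ws.any (fun w => w.head? == some c) := by simp
      rw [h1, htails, hany]
    | cons a rest =>
      by_cases hac : a = c
      · subst hac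
        rw [child_pushW, if_pos rfl]
        have htails : tailsOf a ((a :: rest) :: ws) = rest :: tailsOf a ws := by
          simp [tailsOf, List.filter_cons]
        have hany : ((a :: rest) :: ws).any (fun w => w.head? == some a) = true := by simp
        rw [htails, hany]
        cases h : childGet? t.child a with
        | some u => simp [List.foldl_cons]
        | none => simp [List.foldl_cons]
      · rw [child_pushW, if_neg hac, depth_pushW]
        have htails : tailsOf c ((a :: rest) :: ws) = tailsOf c ws := by
          simp [tailsOf, hac]
        have hany : ((a :: rest) :: ws).any (fun w => w.head? == some c) =
            ws.any (fun w => w.head? == some c) := by simp [hac]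
        rw [htails, hany]

theorem searchW_nil (t : PTrie) : searchW t [] = none := by
  cases t; rfl

theorem searchW_cons (t : PTrie) (c : Char) (rest : List Char) :
    searchW t (c :: rest) =
      if c = '?' then some (t.num.getD (((c :: rest).length : Nat) : Int) 0)
      else match childGet? t.child c with
        | none => some 0
        | some u => searchW u rest := by
  cases t; rfl

theorem search_build (s : List Char) (ws : List (List Char)) (v : String) (d : Int) :
    searchW (ws.foldl pushW (PTrie.mk v d PySem.Dict.empty PChildren.nil)) s = specCount s ws := by
  induction s generalizing ws v d with
  | nil => rw [searchW_nil]; rfl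
  | cons c rest ih =>
    rw [searchW_cons]
    by_cases hc : c = '?'
    · subst hc
      simp only [specCount]
      rw [num_foldl ws _ ((('?' :: rest : List Char)).length) (by simp)]
      simp [PTrie.num, PySem.Dict.getD_empty]
    · simp only [specCount, if_neg hc]
      rw [child_foldl]
      have h0 : childGet? (PTrie.mk v d PySem.Dict.empty PChildren.nil).child c = none := rfl
      rw [h0]
      simp only [PTrie.depth]
      by_cases ha : ws.any (fun w => w.head? == some c) = true
      · rw [if_pos ha]
        simp only [ha, if_true]
        exact ih (tailsOf c ws) _ _
      · rw [if_neg ha, if_neg ha]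

-- A's answer list is the pointwise per-query entry function over the word lists
theorem solution_eq_map (words : List String) (queries : List String) :
    solution words queries = queries.map (entryA words) := by
  simp only [solution]
  rw [show List.foldl (fun (p : PTrie × PTrie) w => (pushW p.1 w.toList, pushW p.2 w.toList.reverse))
        (PTrie.mk "" 0 PySem.Dict.empty PChildren.nil, PTrie.mk "" 0 PySem.Dict.empty PChildren.nil) words =
      (List.foldl (fun t w => pushW t w.toList) (PTrie.mk "" 0 PySem.Dict.empty PChildren.nil) words,
       List.foldl (fun t w => pushW t w.toList.reverse) (PTrie.mk "" 0 PySem.Dict.empty PChildren.nil) words)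
    from PySem.List.foldl_prod_mk (fun t w => pushW t w.toList)
      (fun t w => pushW t w.toList.reverse) words _ _]
  dsimp only
  rw [PySem.List.foldl_append_singleton_eq_map, List.nil_append]
  apply List.map_congr_left
  intro q _
  have hb1 : words.foldl (fun t w => pushW t w.toList) (PTrie.mk "" 0 PySem.Dict.empty PChildren.nil)
      = (words.map String.toList).foldl pushW (PTrie.mk "" 0 PySem.Dict.empty PChildren.nil) :=
    (List.foldl_map).symm
  have hb2 : words.foldl (fun t w => pushW t w.toList.reverse) (PTrie.mk "" 0 PySem.Dict.empty PChildren.nil)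
      = (words.map (fun w => w.toList.reverse)).foldl pushW (PTrie.mk "" 0 PySem.Dict.empty PChildren.nil) :=
    (List.foldl_map).symm
  unfold entryA
  cases q.toList with
  | nil => rfl
  | cons c cs =>
    by_cases hc : c = '?' <;>
      simp only [hc, ne_eq, not_true_eq_false, if_false, not_false_eq_true, if_true,
        hb1, hb2, search_build]

-- B's loop on candidate list ws (all words surviving the first i characters) computes
-- A's search on the trie level i, whose word list is the i-th tails of those candidates
theorem goB_eq_specCount (L : Nat) : ∀ (rem : List Char) (i : Nat) (ws : List (List Char)),
    (∀ w ∈ ws, i ≤ w.length) → i + rem.length = L →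
    goB L i rem ws = specCount rem (ws.map (List.drop i)) := by
  intro rem
  induction rem with
  | nil => intro i ws _ _; rfl
  | cons c rest ih =>
    intro i ws hlen hL
    by_cases hc : c = '?'
    · subst hc
      simp only [goB, specCount, if_pos rfl, List.countP_map]
      have hcnt : List.countP (fun w => w.length == L) ws =
          List.countP ((fun (w : List Char) => w.length == rest.length + 1) ∘ List.drop i) ws := by
        apply List.countP_congr
        intro w hw
        have := hlen w hw
        simp only [Function.comp_apply, List.length_drop, beq_iff_eq]
        simp only [List.length_cons] at hL
        omega
      rw [hcnt]
      simp
    · simp only [goB, specCount, if_neg hc]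
      have hpeq : ∀ w ∈ ws,
          (decide (i < w.length) && (w[i]? == some c)) = ((w.drop i).head? == some c) := by
        intro w _
        rw [List.head?_drop]
        by_cases h : w[i]? = some c
        · have hlt : i < w.length := by
            by_contra hge
            push_neg at hge
            simp [List.getElem?_eq_none hge] at h
          simp [h, hlt]
        · simp [h]
      have hanyEq : ((ws.map (List.drop i)).any (fun w => w.head? == some c)) =
          ws.any (fun w => decide (i < w.length) && (w[i]? == some c)) := by
        rw [List.any_map]
        apply PySem.List.any_congr_mem
        intro w hw
        simp only [Function.comp_apply]
        exact (hpeq w hw).symm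
      have htails : tailsOf c (ws.map (List.drop i)) =
          (ws.filter (fun w => decide (i < w.length) && (w[i]? == some c))).map (List.drop (i + 1)) := by
        rw [tailsOf, List.filter_map, List.map_map]
        rw [List.filter_congr (fun w hw => by
          simp only [Function.comp_apply]
          exact (hpeq w hw).symm)]
        apply List.map_congr_left
        intro w _
        simp [Function.comp, List.tail_drop]
      by_cases hnil : ws.filter (fun w => decide (i < w.length) && (w[i]? == some c)) = []
      · rw [if_pos hnil, hanyEq]
        have hfa : ws.any (fun w => decide (i < w.length) && (w[i]? == some c)) = false := by
          rw [List.any_eq_false]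
          intro w hw
          have h2 := List.filter_eq_nil_iff.mp hnil w hw
          simpa using h2
        rw [hfa, if_neg (by simp)]
      · rw [if_neg hnil, hanyEq]
        have htr : ws.any (fun w => decide (i < w.length) && (w[i]? == some c)) = true := by
          by_contra h
          rw [Bool.not_eq_true, List.any_eq_false] at h
          exact hnil (List.filter_eq_nil_iff.mpr (fun w hw => by simpa using h w hw))
        rw [htr, if_pos rfl, htails]
        refine ih (i + 1) _ ?_ ?_
        · intro w hw
          have h2 := List.of_mem_filter hw
          simp only [Bool.and_eq_true, decide_eq_true_eq] at h2
          omega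
        · simp only [List.length_cons] at hL
          omega

-- ===== VERDICT (by name: the statement is the Claim_ definition above) =====
theorem solution_spec : Claim_equal_solution := by
  intro words queries _ hpre
  show solution words queries = solution_alt words queries
  rw [solution_eq_map]
  simp only [solution_alt]
  apply List.map_congr_left
  intro q hq
  have hqne : q ≠ "" := hpre q hq
  obtain ⟨c, cs, hql⟩ : ∃ c cs, q.toList = c :: cs := by
    cases h : q.toList with
    | nil => exact absurd (String.toList_eq_nil_iff.mp h) hqne
    | cons a l => exact ⟨a, l, rfl⟩
  have hB : ∀ (s : List Char) (ws : List (List Char)),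
      searchB s ws = specCount s ws := by
    intro s ws
    rw [searchB, goB_eq_specCount s.length s 0 ws (fun _ _ => Nat.zero_le _) (by omega)]
    have h0 : ws.map (List.drop 0) = ws :=
      (List.map_congr_left (fun w _ => List.drop_zero)).trans (List.map_id ws)
    rw [h0]
  unfold entryA
  rw [hql]
  by_cases hc : c = '?'
  · subst hc
    rw [hB]
    simp
  · rw [hB]
    simp only [hc, ne_eq, not_false_eq_true, if_true]
    exact (hB _ _).symm
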